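-- pv_equiv track=rewrite | github.com/mihikakrishna/advent_of_code_2021 | day10/10.2.py | inc_parentheses
-- ===== SOURCE A (Python) =====
-- from collections import deque
--
-- def inc_parentheses(str):
--     open_parentheses = "([{<"
--     close_parentheses = ")]}>"
--     stack = deque()
--     for c in str:
--         if c in open_parentheses:
--             stack.append(c)
--         elif c in close_parentheses:
--             p = stack.pop()
--             if open_parentheses.index(p) != close_parentheses.index(c): return '0'
--     str = "".join(stack)[::-1]
--     ret = ""
--     for i in range(len(str)):
--         ret += close_parentheses[open_parentheses.index(str[i])]
--     return(ret)
-- ===== SOURCE B (Python) =====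
-- def inc_parentheses(str):
--     match = {'(': ')', '[': ']', '{': '}', '<': '>'}
--     s = ''.join(c for c in str if c in '()[]{}<>')
--     # rewrite to normal form: repeatedly delete adjacent matched pairs
--     while True:
--         t = s.replace('()', '').replace('[]', '').replace('{}', '').replace('<>', '')
--         if t == s:
--             break
--         s = t
--     if any(c in ')]}>' for c in s):
--         return '0'
--     return ''.join(match[c] for c in reversed(s))
-- ===== Notes on version B (the rewrite author's own statement) =====
-- stated objective: alternative
-- what changed: B replaces A's stack simulation by string rewriting to a normal form: it drops non-bracket chars, repeatedly deletes adjacent matched pairs with str.replace until a fixpoint, then reads the answer off the irreducible residue ('0' if any closer survives, otherwise the reversed residue mapped to closers).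
-- outside the precondition, e.g. on inc_parentheses('(})('): A returns '0', B returns '0'
import Mathlib
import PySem

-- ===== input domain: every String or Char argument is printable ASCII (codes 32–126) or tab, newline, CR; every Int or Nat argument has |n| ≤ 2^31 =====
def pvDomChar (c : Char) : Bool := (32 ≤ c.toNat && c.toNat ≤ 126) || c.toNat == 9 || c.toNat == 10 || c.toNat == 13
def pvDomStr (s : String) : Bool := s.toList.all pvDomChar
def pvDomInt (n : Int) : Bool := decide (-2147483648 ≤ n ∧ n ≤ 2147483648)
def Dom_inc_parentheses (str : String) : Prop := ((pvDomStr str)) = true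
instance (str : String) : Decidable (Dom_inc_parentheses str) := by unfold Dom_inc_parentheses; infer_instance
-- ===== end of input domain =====

-- B replaces A's stack simulation by string rewriting: delete adjacent matched bracket
-- pairs until a fixpoint and read the answer off the irreducible residue; objective: alternative.

-- ===== PORT A =====
def pvOpens : List Char := ['(', '[', '{', '<']
def pvCloses : List Char := [')', ']', '}', '>']

-- A's loop; stack held top-first (push = cons, pop = head = deque.pop from the right).
-- `none` = either the `return '0'` branch or the IndexError pop on an empty stack;
-- the IndexError case is excluded by Pre_inc_parentheses, so `none` ⇒ '0' on admitted inputs.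
-- `.idxOf` is Python's `.index`: both arguments are always found (p comes off a stack of openers,
-- c is guarded by `c ∈ pvCloses`), so it is exact here.
def pvLoopA : List Char → List Char → Option (List Char)
  | [], st => some st
  | c :: rest, st =>
    if c ∈ pvOpens then pvLoopA rest (c :: st)
    else if c ∈ pvCloses then
      match st with
      | [] => none
      | p :: st' =>
        if pvOpens.idxOf p ≠ pvCloses.idxOf c then none else pvLoopA rest st'
    else pvLoopA rest st

def inc_parentheses (str : String) : String :=
  match pvLoopA str.toList [] with
  | none => "0"
  | some st =>
    -- str = "".join(stack)[::-1] is exactly st (top-first); then the completion loop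
    String.ofList (st.map (fun p => pvCloses.getD (pvOpens.idxOf p) ' '))

-- ===== PORT B =====
def pvMatch : PySem.Dict Char Char :=
  PySem.Dict.ofList [('(', ')'), ('[', ']'), ('{', '}'), ('<', '>')]

def pvBrackets : List Char := ['(', ')', '[', ']', '{', '}', '<', '>']

-- one rewriting iteration of Source B's while-loop body
def pvStep (s : String) : String :=
  PySem.Str.replace (PySem.Str.replace (PySem.Str.replace (PySem.Str.replace s "()" "") "[]" "") "{}" "") "<>" ""

-- Source B's `while True` loop; every changing iteration strictly shortens the string, so
-- fuel = length + 1 is enough and is never exhausted (proved in pvReduce_spec below).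
def pvReduce : Nat → String → String
  | 0, s => s
  | f + 1, s => let t := pvStep s; if t = s then s else pvReduce f t

def inc_parentheses_alt (str : String) : String :=
  let s := String.ofList (str.toList.filter (fun c => c ∈ pvBrackets))
  let r := pvReduce (s.toList.length + 1) s
  if r.toList.any (fun c => c ∈ pvCloses) then "0"
  else
    -- match[c] never raises KeyError here: the residue chars are all openers
    String.ofList (r.toList.reverse.map (fun c => (PySem.Dict.get? pvMatch c).getD ' '))

-- ===== PRECONDITION & SPEC =====
-- A raises IndexError (deque.pop on an empty deque) when a closing bracket arrives on an empty
-- stack; Pre_ excludes all strings with a prefix holding more closers than openers. On a few of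
-- those A still returns '0' via an earlier mismatch, and B returns '0' there too (see the cite
-- in claim.json).
def Pre_inc_parentheses (str : String) : Prop :=
  ∀ i ∈ List.range (str.toList.length + 1),
    (str.toList.take i).countP (· ∈ pvCloses) ≤ (str.toList.take i).countP (· ∈ pvOpens)
instance (str : String) : Decidable (Pre_inc_parentheses str) := by unfold Pre_inc_parentheses; infer_instance

def pvWitness_inc_parentheses : String := "(a[{<>"

def Spec_inc_parentheses (str : String) (out : String) : Prop := out = inc_parentheses_alt str
instance (str : String) (out : String) : Decidable (Spec_inc_parentheses str out) := by unfold Spec_inc_parentheses; infer_instance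

-- ===== CLAIM (what is proved, stated in full; the proofs are below) =====
def Claim_equal_inc_parentheses : Prop := ∀ (str : String), Dom_inc_parentheses str → Pre_inc_parentheses str → Spec_inc_parentheses str (inc_parentheses str)

-- ===== LEMMAS AND PROOFS =====

-- the four matched pairs, and the translation A's completion loop computes
def pvPairsL : List (Char × Char) := [('(', ')'), ('[', ']'), ('{', '}'), ('<', '>')]
def pvClose (p : Char) : Char := pvCloses.getD (pvOpens.idxOf p) ' '

theorem closes_not_opens : ∀ c ∈ pvCloses, c ∉ pvOpens := by
  intro c hc; fin_cases hc <;> decide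
theorem opens_sub_brackets : ∀ a ∈ pvOpens, a ∈ pvBrackets := by
  intro a ha; fin_cases ha <;> decide
theorem closes_sub_brackets : ∀ a ∈ pvCloses, a ∈ pvBrackets := by
  intro a ha; fin_cases ha <;> decide
theorem brackets_split : ∀ a ∈ pvBrackets, a ∈ pvOpens ∨ a ∈ pvCloses := by
  intro a ha; fin_cases ha <;> decide
theorem idx_eq_mem_pairs : ∀ o ∈ pvOpens, ∀ c ∈ pvCloses,
    pvOpens.idxOf o = pvCloses.idxOf c → (o, c) ∈ pvPairsL := by
  intro o ho c hc
  fin_cases ho <;> fin_cases hc <;> decide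
theorem match_getD_opens : ∀ p ∈ pvOpens, (PySem.Dict.get? pvMatch p).getD ' ' = pvClose p := by
  intro p hp; fin_cases hp <;> decide

-- one-step unfolding of A's loop (the nested stack match splits the auto equations)
theorem pvLoopA_cons (c : Char) (rest st : List Char) :
    pvLoopA (c :: rest) st =
      if c ∈ pvOpens then pvLoopA rest (c :: st)
      else if c ∈ pvCloses then
        match st with
        | [] => none
        | p :: st' => if pvOpens.idxOf p ≠ pvCloses.idxOf c then none else pvLoopA rest st'
      else pvLoopA rest st := by
  cases st <;> rfl

-- stepping the same char over two tails that agree pointwise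
theorem pvLoopA_cons_congr (c : Char) (t1 t2 : List Char)
    (h : ∀ st, pvLoopA t1 st = pvLoopA t2 st) :
    ∀ st, pvLoopA (c :: t1) st = pvLoopA (c :: t2) st := by
  intro st
  rw [pvLoopA_cons, pvLoopA_cons]
  by_cases h1 : c ∈ pvOpens
  · simp only [if_pos h1]; exact h _
  · by_cases h2 : c ∈ pvCloses
    · simp only [if_neg h1, if_pos h2]
      cases st with
      | nil => rfl
      | cons p st' =>
        by_cases hm : pvOpens.idxOf p ≠ pvCloses.idxOf c
        · simp only [if_pos hm]
        · simp only [if_neg hm]; exact h _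
    · simp only [if_neg h1, if_neg h2]; exact h _

-- A's loop ignores non-bracket characters
theorem pvLoopA_filter : ∀ (l : List Char) (st : List Char),
    pvLoopA (l.filter (fun c => c ∈ pvBrackets)) st = pvLoopA l st := by
  intro l
  induction l with
  | nil => intro st; rfl
  | cons c t ih =>
    by_cases hc : c ∈ pvBrackets
    · rw [List.filter_cons_of_pos (by simpa using hc)]
      exact pvLoopA_cons_congr c _ t ih
    · rw [List.filter_cons_of_neg (by simpa using hc)]
      intro st
      rw [ih st, pvLoopA_cons,
        if_neg (fun h => hc (opens_sub_brackets c h)),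
        if_neg (fun h => hc (closes_sub_brackets c h))]

-- a run of openers just gets pushed
theorem pvLoopA_opens (os : List Char) (h : ∀ a ∈ os, a ∈ pvOpens) :
    ∀ st, pvLoopA os st = some (os.reverse ++ st) := by
  induction os with
  | nil => intro st; simp [pvLoopA]
  | cons a t ih =>
    intro st
    rw [pvLoopA_cons, if_pos (h a List.mem_cons_self),
      ih (fun x hx => h x (List.mem_cons_of_mem _ hx)) (a :: st)]
    simp

-- composition of A's loop over an append
theorem pvLoopA_append : ∀ (x y st : List Char),
    pvLoopA (x ++ y) st =
      match pvLoopA x st with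
      | none => none
      | some st' => pvLoopA y st' := by
  intro x
  induction x with
  | nil => intro y st; simp [pvLoopA]
  | cons c rest ih =>
    intro y st
    rw [List.cons_append, pvLoopA_cons, pvLoopA_cons]
    by_cases h1 : c ∈ pvOpens
    · simp only [if_pos h1]; exact ih y (c :: st)
    · by_cases h2 : c ∈ pvCloses
      · simp only [if_neg h1, if_pos h2]
        cases st with
        | nil => rfl
        | cons p st' =>
          by_cases hm : pvOpens.idxOf p ≠ pvCloses.idxOf c
          · simp only [if_pos hm]
          · simp only [if_neg hm]; exact ih y st'
      · simp only [if_neg h1, if_neg h2]; exact ih y st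

-- ---- the rewriting step, factored through a clean recursion rmAll ----

-- delete every (left-to-right, non-overlapping) adjacent occurrence of o,c — what
-- Python's s.replace(o+c, '') computes
def rmAll (o c : Char) : List Char → List Char
  | [] => []
  | [a] => [a]
  | a :: b :: t => if a = o ∧ b = c then rmAll o c t else a :: rmAll o c (b :: t)

theorem replace_go_eq (o c : Char) : ∀ (fuel : Nat) (l acc : List Char), l.length ≤ fuel →
    PySem.Chars.replace.go [o, c] [] fuel l acc = acc.reverse ++ rmAll o c l := by
  intro fuel
  induction fuel with
  | zero =>
    intro l acc h
    have : l = [] := List.eq_nil_of_length_eq_zero (Nat.le_zero.mp h)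
    subst this; simp [PySem.Chars.replace.go, rmAll]
  | succ f ih =>
    intro l acc h
    match l with
    | [] => simp [PySem.Chars.replace.go, rmAll]
    | [a] =>
      have hp : ([o, c].isPrefixOf [a]) = false := by simp [List.isPrefixOf]
      rw [PySem.Chars.replace.go, if_neg (by simp [hp])]
      rw [ih [] (a :: acc) (by simp)]
      simp [rmAll]
    | a :: b :: t =>
      by_cases hab : a = o ∧ b = c
      · obtain ⟨rfl, rfl⟩ := hab
        have hp : ([a, b].isPrefixOf (a :: b :: t)) = true := by simp [List.isPrefixOf]
        rw [PySem.Chars.replace.go, if_pos hp]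
        simp only [List.length_cons] at h
        rw [show List.drop [a,b].length (a :: b :: t) = t from rfl]
        simp only [List.reverse_nil, List.nil_append]
        rw [ih t acc (by omega)]
        simp [rmAll]
      · have hp : ([o, c].isPrefixOf (a :: b :: t)) = false := by
          simp [List.isPrefixOf]
          intro h1 h2; exact absurd ⟨h1.symm, h2.symm⟩ hab
        rw [PySem.Chars.replace.go, if_neg (by simp [hp])]
        simp only [List.length_cons] at h
        rw [ih (b :: t) (a :: acc) (by simp; omega)]
        simp [rmAll, hab]

theorem replace_eq_rmAll (o c : Char) (l : List Char) :
    PySem.Chars.replace l [o, c] [] = rmAll o c l := by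
  rw [PySem.Chars.replace]
  rw [if_neg (by simp)]
  simpa using replace_go_eq o c l.length l [] le_rfl

theorem rmAll_sublist (o c : Char) : ∀ l : List Char, (rmAll o c l).Sublist l := by
  intro l
  induction l using rmAll.induct o c with
  | case1 => simp [rmAll]
  | case2 a => simp [rmAll]
  | case3 a b t h ih =>
    obtain ⟨rfl, rfl⟩ := h
    rw [show rmAll a b (a :: b :: t) = rmAll a b t from by rw [rmAll]; simp]
    exact ih.trans ((List.sublist_cons_self _ _).trans (List.sublist_cons_self _ _))
  | case4 a b t h ih =>
    rw [show rmAll o c (a :: b :: t) = a :: rmAll o c (b :: t) from by rw [rmAll]; simp [h]]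
    exact ih.cons₂ a

-- a fixpoint of rmAll contains no adjacent o,c
theorem rmAll_fix_no_occ (o c : Char) : ∀ l : List Char, rmAll o c l = l →
    ∀ x y, l ≠ x ++ o :: c :: y := by
  intro l
  induction l using rmAll.induct o c with
  | case1 => intro _ x y h; exact by simpa using congrArg List.length h
  | case2 a =>
    intro _ x y h
    have := congrArg List.length h
    simp at this; omega
  | case3 a b t h ih =>
    obtain ⟨rfl, rfl⟩ := h
    intro hfix
    rw [show rmAll a b (a :: b :: t) = rmAll a b t from by rw [rmAll]; simp] at hfix
    have hlen : (rmAll a b t).length ≤ t.length := (rmAll_sublist a b t).length_le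
    have := congrArg List.length hfix
    simp at this; omega
  | case4 a b t h ih =>
    intro hfix
    rw [show rmAll o c (a :: b :: t) = a :: rmAll o c (b :: t) from by rw [rmAll]; simp [h]] at hfix
    have htail : rmAll o c (b :: t) = b :: t := by
      injection hfix
    intro x y hdec
    match x, hdec with
    | [], hdec =>
      have h1 : a = o := by injection hdec
      have h2 : b = c := by
        have := hdec; injection this with _ this; injection this
      exact h (⟨h1, h2⟩)
    | a' :: x', hdec =>
      have h2 : b :: t = x' ++ o :: c :: y := by
        injection hdec
      exact ih htail x' y h2

-- rmAll preserves A's loop when (o,c) is a matched pair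
theorem rmAll_loopA (o c : Char) (ho : o ∈ pvOpens) (hc : c ∈ pvCloses)
    (hm : pvOpens.idxOf o = pvCloses.idxOf c) :
    ∀ (l : List Char) (st : List Char), pvLoopA (rmAll o c l) st = pvLoopA l st := by
  intro l
  induction l using rmAll.induct o c with
  | case1 => intro st; rfl
  | case2 a => intro st; rfl
  | case3 a b t h ih =>
    obtain ⟨rfl, rfl⟩ := h
    intro st
    rw [show rmAll a b (a :: b :: t) = rmAll a b t from by rw [rmAll]; simp]
    rw [ih st, pvLoopA_cons, if_pos ho, pvLoopA_cons,
      if_neg (closes_not_opens b hc), if_pos hc]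
    simp [hm]
  | case4 a b t h ih =>
    rw [show rmAll o c (a :: b :: t) = a :: rmAll o c (b :: t) from by rw [rmAll]; simp [h]]
    exact pvLoopA_cons_congr a _ (b :: t) ih

-- the composite rewriting step, on lists
def listStep (l : List Char) : List Char :=
  rmAll '<' '>' (rmAll '{' '}' (rmAll '[' ']' (rmAll '(' ')' l)))

theorem pvStep_toList (s : String) : (pvStep s).toList = listStep s.toList := by
  have t1 : ("()" : String).toList = ['(', ')'] := rfl
  have t2 : ("[]" : String).toList = ['[', ']'] := rfl
  have t3 : ("{}" : String).toList = ['{', '}'] := rfl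
  have t4 : ("<>" : String).toList = ['<', '>'] := rfl
  have t0 : ("" : String).toList = [] := rfl
  simp only [pvStep, PySem.Str.toList_replace, t1, t2, t3, t4, t0,
    replace_eq_rmAll, listStep]

theorem listStep_loopA (l st : List Char) : pvLoopA (listStep l) st = pvLoopA l st := by
  unfold listStep
  rw [rmAll_loopA '<' '>' (by decide) (by decide) (by decide),
    rmAll_loopA '{' '}' (by decide) (by decide) (by decide),
    rmAll_loopA '[' ']' (by decide) (by decide) (by decide),
    rmAll_loopA '(' ')' (by decide) (by decide) (by decide)]

theorem listStep_sublist (l : List Char) : (listStep l).Sublist l :=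
  (rmAll_sublist _ _ _).trans ((rmAll_sublist _ _ _).trans
    ((rmAll_sublist _ _ _).trans (rmAll_sublist _ _ _)))

-- a fixpoint of the composite step is a fixpoint of each deletion
theorem listStep_fix_each (l : List Char) (h : listStep l = l) :
    rmAll '(' ')' l = l ∧ rmAll '[' ']' l = l ∧ rmAll '{' '}' l = l ∧ rmAll '<' '>' l = l := by
  unfold listStep at h
  have hl4 := congrArg List.length h
  have L1 := (rmAll_sublist '(' ')' l).length_le
  have L2 := (rmAll_sublist '[' ']' (rmAll '(' ')' l)).length_le
  have L3 := (rmAll_sublist '{' '}' (rmAll '[' ']' (rmAll '(' ')' l))).length_le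
  have L4 := (rmAll_sublist '<' '>' (rmAll '{' '}' (rmAll '[' ']' (rmAll '(' ')' l)))).length_le
  have e1 : rmAll '(' ')' l = l := (rmAll_sublist '(' ')' l).eq_of_length (by omega)
  rw [e1] at h hl4 L2 L3 L4
  have e2 : rmAll '[' ']' l = l := (rmAll_sublist '[' ']' l).eq_of_length (by omega)
  rw [e2] at h hl4 L3 L4
  have e3 : rmAll '{' '}' l = l := (rmAll_sublist '{' '}' l).eq_of_length (by omega)
  rw [e3] at h
  exact ⟨e1, e2, e3, h⟩

theorem listStep_no_adj (l : List Char) (h : listStep l = l) :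
    ∀ x y o c, (o, c) ∈ pvPairsL → l ≠ x ++ o :: c :: y := by
  obtain ⟨e1, e2, e3, e4⟩ := listStep_fix_each l h
  intro x y o c hmem
  simp only [pvPairsL, List.mem_cons, List.not_mem_nil, or_false, Prod.mk.injEq] at hmem
  rcases hmem with ⟨rfl, rfl⟩ | ⟨rfl, rfl⟩ | ⟨rfl, rfl⟩ | ⟨rfl, rfl⟩
  · exact rmAll_fix_no_occ _ _ l e1 x y
  · exact rmAll_fix_no_occ _ _ l e2 x y
  · exact rmAll_fix_no_occ _ _ l e3 x y
  · exact rmAll_fix_no_occ _ _ l e4 x y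

-- the reduction loop: preserves A's loop, reaches a fixpoint, keeps elements
theorem pvReduce_spec : ∀ (fuel : Nat) (s : String), s.toList.length < fuel →
    pvLoopA (pvReduce fuel s).toList [] = pvLoopA s.toList []
    ∧ listStep (pvReduce fuel s).toList = (pvReduce fuel s).toList
    ∧ ∀ a ∈ (pvReduce fuel s).toList, a ∈ s.toList := by
  intro fuel
  induction fuel with
  | zero => intro s h; omega
  | succ f ih =>
    intro s h
    rw [pvReduce]
    by_cases hfix : pvStep s = s
    · simp only [hfix]
      refine ⟨rfl, ?_, fun a ha => ha⟩
      have := congrArg String.toList hfix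
      rw [pvStep_toList] at this
      exact this
    · simp only [if_neg hfix]
      have hsub : ((pvStep s).toList).Sublist s.toList := by
        rw [pvStep_toList]; exact listStep_sublist _
      have hlt : (pvStep s).toList.length < s.toList.length := by
        rcases Nat.lt_or_ge (pvStep s).toList.length s.toList.length with h' | h'
        · exact h'
        · exfalso
          have heq : (pvStep s).toList = s.toList :=
            hsub.eq_of_length (Nat.le_antisymm hsub.length_le h')
          exact hfix (by
            have := congrArg String.ofList heq
            simpa using this)
      obtain ⟨i1, i2, i3⟩ := ih (pvStep s) (by omega)
      refine ⟨?_, i2, fun a ha => hsub.subset (i3 a ha)⟩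
      rw [i1, pvStep_toList, listStep_loopA]

-- evaluation of A's loop on an irreducible all-bracket residue
theorem dropWhile_head_false (p : Char → Bool) : ∀ (l : List Char) (c : Char) (t : List Char),
    l.dropWhile p = c :: t → p c = false := by
  intro l
  induction l with
  | nil => intro c t h; simp [List.dropWhile] at h
  | cons a l' ih =>
    intro c t h
    rw [List.dropWhile_cons] at h
    by_cases ha : p a = true
    · rw [if_pos ha] at h; exact ih c t h
    · rw [if_neg ha] at h
      injection h with h1 _
      subst h1
      exact Bool.not_eq_true _ |>.mp ha

theorem residue_eval (l : List Char) (hb : ∀ a ∈ l, a ∈ pvBrackets)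
    (hno : ∀ x y o c, (o, c) ∈ pvPairsL → l ≠ x ++ o :: c :: y) :
    pvLoopA l [] = if l.any (fun c => c ∈ pvCloses) then none else some l.reverse := by
  by_cases hc : l.any (fun c => c ∈ pvCloses) = true
  · rw [if_pos hc]
    -- split l at the first non-opener, which must be a closer
    have hdec := List.takeWhile_append_dropWhile (p := fun c => decide (c ∈ pvOpens)) (l := l)
    have hos_opens : ∀ a ∈ l.takeWhile (fun c => decide (c ∈ pvOpens)), a ∈ pvOpens := by
      intro a ha; simpa using List.mem_takeWhile_imp ha
    cases hr : l.dropWhile (fun c => decide (c ∈ pvOpens)) with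
    | nil =>
      exfalso
      rw [hr, List.append_nil] at hdec
      obtain ⟨a, ha, hac⟩ := List.any_eq_true.mp hc
      exact closes_not_opens a (by simpa using hac) (hos_opens a (by rw [hdec]; exact ha))
    | cons c0 t =>
      have hc0_not_open : c0 ∉ pvOpens := by
        simpa using dropWhile_head_false _ l c0 t hr
      rw [hr] at hdec
      have hc0_mem : c0 ∈ l := by
        rw [← hdec]; exact List.mem_append_right _ List.mem_cons_self
      have hc0_close : c0 ∈ pvCloses :=
        (brackets_split c0 (hb c0 hc0_mem)).resolve_left hc0_not_open
      have hkey : pvLoopA l [] =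
          pvLoopA (c0 :: t) ((l.takeWhile (fun c => decide (c ∈ pvOpens))).reverse ++ []) := by
        conv_lhs => rw [← hdec]
        rw [pvLoopA_append, pvLoopA_opens _ hos_opens []]
      rw [List.append_nil] at hkey
      rw [hkey]
      rcases List.eq_nil_or_concat (l.takeWhile (fun c => decide (c ∈ pvOpens))) with he | ⟨os', o, he⟩
      · rw [he, List.reverse_nil, pvLoopA_cons, if_neg hc0_not_open, if_pos hc0_close]
      · have ho : o ∈ pvOpens := hos_opens o (by rw [he]; simp)
        have hne : pvOpens.idxOf o ≠ pvCloses.idxOf c0 := fun heq =>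
          hno os' t o c0 (idx_eq_mem_pairs o ho c0 hc0_close heq)
            (by conv_lhs => rw [← hdec, he]
                rw [List.concat_eq_append, List.append_assoc, List.singleton_append])
        have hrev : (os'.concat o).reverse = o :: os'.reverse := by simp
        rw [he, hrev, pvLoopA_cons, if_neg hc0_not_open, if_pos hc0_close]
        simp [hne]
  · rw [if_neg hc]
    have hop : ∀ a ∈ l, a ∈ pvOpens := by
      intro a ha
      rcases brackets_split a (hb a ha) with h | h
      · exact h
      · exact absurd (List.any_eq_true.mpr ⟨a, ha, by simpa using h⟩) hc
    rw [pvLoopA_opens l hop []]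
    simp

-- ===== VERDICT (by name: the statement is the Claim_ definition above) =====
set_option maxHeartbeats 1000000 in
theorem inc_parentheses_spec : Claim_equal_inc_parentheses := by
  intro str _ _
  unfold Spec_inc_parentheses inc_parentheses inc_parentheses_alt
  simp only [String.toList_ofList]
  obtain ⟨h1, h2, h3⟩ := pvReduce_spec
    ((str.toList.filter (fun c => c ∈ pvBrackets)).length + 1)
    (String.ofList (str.toList.filter (fun c => c ∈ pvBrackets)))
    (by simp)
  simp only [String.toList_ofList] at h1 h3
  set R := (pvReduce ((str.toList.filter (fun c => c ∈ pvBrackets)).length + 1)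
    (String.ofList (str.toList.filter (fun c => c ∈ pvBrackets)))).toList with hR
  have hbr : ∀ a ∈ R, a ∈ pvBrackets := by
    intro a ha
    have := h3 a ha
    simpa using (List.mem_filter.mp this).2
  have hres := residue_eval R hbr (listStep_no_adj R h2)
  have hAll : pvLoopA str.toList [] =
      if R.any (fun c => c ∈ pvCloses) then none else some R.reverse := by
    rw [← pvLoopA_filter str.toList [], ← h1, hres]
  rw [hAll]
  by_cases hany : R.any (fun c => c ∈ pvCloses) = true
  · rw [if_pos hany, if_pos hany]
  · rw [if_neg hany, if_neg hany]
    have hmap : R.reverse.map (fun c => (PySem.Dict.get? pvMatch c).getD ' ')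
        = R.reverse.map (fun p => pvCloses.getD (pvOpens.idxOf p) ' ') := by
      apply List.map_congr_left
      intro p hp
      have hpo : p ∈ pvOpens := by
        have hpl : p ∈ R := List.mem_reverse.mp hp
        rcases brackets_split p (hbr p hpl) with h | h
        · exact h
        · exact absurd (List.any_eq_true.mpr ⟨p, hpl, by simpa using h⟩) hany
      exact (match_getD_opens p hpo).trans rfl
    rw [hmap]
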